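-- pv_equiv track=rewrite | github.com/lastCoyotes/AOC2025 | AOC4b.py | removableRolls
-- ===== SOURCE A (Python) =====
-- dir = [
--     (-1, -1), (0, -1), (1, -1),
--     (-1,  0),          (1,  0),
--     (-1,  1), (0,  1), (1,  1)
-- ]
--
-- def removableRolls(grid):
--     result = 0
--     removedRolls = []
--
--     for i in range(len(grid)):
--         for j in range(len(grid[0])):
--             # check the surrounding neighbors of grid[i][j] IF the current position in the grid is a roll (@)
--             if grid[i][j] == '@':
--                 nearby = 0
--                 for dx, dy in dir:
--                     neighborX = i + dx
--                     neighborY = j + dy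
--
--                     # stay within bounds
--                     if 0 <= neighborX < len(grid) and 0 <= neighborY < len(grid[0]):
--                         if grid[neighborX][neighborY] == '@':
--                             nearby += 1
--                 if nearby < 4:
--                     result += 1
--                     removedRolls.append((i, j))
--     return result, removedRolls
-- ===== SOURCE B (Python) =====
-- def removableRolls(grid):
--     rows = len(grid)
--     width = len(grid[0]) if rows else 0
--     # scatter pass: every '@' cell adds 1 to each in-bounds neighbor's count
--     nbr = {}
--     for x in range(rows):
--         for y in range(width):
--             if grid[x][y] == '@':
--                 for dx, dy in ((-1, -1), (-1, 0), (-1, 1), (0, -1),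
--                                (0, 1), (1, -1), (1, 0), (1, 1)):
--                     nx, ny = x + dx, y + dy
--                     if 0 <= nx < rows and 0 <= ny < width:
--                         nbr[(nx, ny)] = nbr.get((nx, ny), 0) + 1
--     # row-major collection pass
--     removed = []
--     for i in range(rows):
--         for j in range(width):
--             if grid[i][j] == '@' and nbr.get((i, j), 0) < 4:
--                 removed.append((i, j))
--     return len(removed), removed
-- ===== Notes on version B (the rewrite author's own statement) =====
-- stated objective: alternative
-- what changed: A gathers: for each '@' cell it probes all 8 neighbors and counts; B scatters: one pass adds +1 to a dict entry for each in-bounds neighbor of every '@' cell, then a second row-major pass collects the '@' cells whose accumulated count is below 4.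
import Mathlib
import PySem

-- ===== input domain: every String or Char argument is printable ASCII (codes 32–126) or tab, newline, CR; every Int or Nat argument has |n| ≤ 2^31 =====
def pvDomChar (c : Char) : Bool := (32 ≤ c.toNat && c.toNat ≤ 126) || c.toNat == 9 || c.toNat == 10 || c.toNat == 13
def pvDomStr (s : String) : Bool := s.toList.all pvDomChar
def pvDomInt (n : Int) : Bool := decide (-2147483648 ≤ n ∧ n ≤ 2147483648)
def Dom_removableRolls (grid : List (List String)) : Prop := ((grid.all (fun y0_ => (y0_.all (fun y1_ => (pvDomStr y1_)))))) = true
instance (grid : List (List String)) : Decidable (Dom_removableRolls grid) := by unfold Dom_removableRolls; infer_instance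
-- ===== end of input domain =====

-- B replaces A's per-cell 8-direction neighbor GATHER by a two-stage SCATTER: one pass adds +1
-- into a dict entry for each in-bounds neighbor of every '@' cell, then a second row-major pass
-- collects the '@' cells whose accumulated count is < 4 (objective: alternative, same asymptotic cost).

-- ===== PORT A =====
-- the module-level `dir` list, in A's order
def pvDirsA : List (Int × Int) := [(-1,-1),(0,-1),(1,-1),(-1,0),(1,0),(-1,1),(0,1),(1,1)]

-- grid[i][j]; the IndexError case (excluded by Pre_) is mapped to defaults "" / []
def pvAt (grid : List (List String)) (i j : Int) : String :=
  PySem.List.pyGetD (PySem.List.pyGetD grid i []) j ""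

-- A's inner `nearby` accumulation loop over `dir`
def pvNearby (grid : List (List String)) (i j : Int) : Int :=
  pvDirsA.foldl (fun n d =>
    if 0 ≤ i + d.1 ∧ i + d.1 < PySem.List.len grid ∧
       0 ≤ j + d.2 ∧ j + d.2 < PySem.List.len (PySem.List.pyGetD grid 0 []) then
      (if pvAt grid (i + d.1) (j + d.2) = "@" then n + 1 else n)
    else n) 0

def removableRolls (grid : List (List String)) : Int × (List (Int × Int)) :=
  (PySem.List.pyRange 0 (PySem.List.len grid)).foldl (fun st i =>
    (PySem.List.pyRange 0 (PySem.List.len (PySem.List.pyGetD grid 0 []))).foldl (fun st j =>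
      if pvAt grid i j = "@" then
        (if pvNearby grid i j < 4 then (st.1 + 1, st.2 ++ [(i, j)]) else st)
      else st) st)
    ((0 : Int), ([] : List (Int × Int)))

-- ===== PORT B =====
-- B's offset tuples, in B's order (dx outer, dy inner, (0,0) omitted)
def pvOffsB : List (Int × Int) := [(-1,-1),(-1,0),(-1,1),(0,-1),(0,1),(1,-1),(1,0),(1,1)]

-- grid[x][y] (same total access; ragged IndexError cases are excluded by Pre_)
def pvCellB (grid : List (List String)) (x y : Int) : String :=
  PySem.List.pyGetD (PySem.List.pyGetD grid x []) y ""

-- width = len(grid[0]) if rows else 0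
def pvWidthB (grid : List (List String)) : Int :=
  match grid with
  | [] => 0
  | r :: _ => PySem.List.len r

-- the scatter pass: nbr[(nx, ny)] = nbr.get((nx, ny), 0) + 1 for each in-bounds neighbor of each '@'
def pvScatter (grid : List (List String)) : PySem.Dict (Int × Int) Int :=
  (PySem.List.pyRange 0 (PySem.List.len grid)).foldl (fun d x =>
    (PySem.List.pyRange 0 (pvWidthB grid)).foldl (fun d y =>
      if pvCellB grid x y = "@" then
        pvOffsB.foldl (fun d p =>
          if 0 ≤ x + p.1 ∧ x + p.1 < PySem.List.len grid ∧
             0 ≤ y + p.2 ∧ y + p.2 < pvWidthB grid then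
            d.insert (x + p.1, y + p.2) (d.getD (x + p.1, y + p.2) 0 + 1)
          else d) d
      else d) d) PySem.Dict.empty

def removableRolls_alt (grid : List (List String)) : Int × (List (Int × Int)) :=
  let nbr := pvScatter grid
  let removed := (PySem.List.pyRange 0 (PySem.List.len grid)).foldl (fun acc i =>
    (PySem.List.pyRange 0 (pvWidthB grid)).foldl (fun acc j =>
      if pvCellB grid i j = "@" ∧ nbr.getD (i, j) 0 < 4 then acc ++ [(i, j)] else acc) acc) []
  (PySem.List.len removed, removed)

-- ===== PRECONDITION & SPEC =====
-- Pre_ excludes exactly the ragged grids in which some row is shorter than the first row: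
-- there A raises IndexError on grid[i][j] / grid[neighborX][neighborY] (B raises on grid[x][y] too).
def Pre_removableRolls (grid : List (List String)) : Prop :=
  ∀ row ∈ grid, (grid.headD []).length ≤ row.length
instance (grid : List (List String)) : Decidable (Pre_removableRolls grid) := by
  unfold Pre_removableRolls; infer_instance

def pvWitness_removableRolls : List (List String) := [["@", "."], [".", "@"]]

def Spec_removableRolls (grid : List (List String)) (out : Int × (List (Int × Int))) : Prop := out = removableRolls_alt grid
instance (grid : List (List String)) (out : Int × (List (Int × Int))) : Decidable (Spec_removableRolls grid out) := by unfold Spec_removableRolls; infer_instance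

-- ===== CLAIM (what is proved, stated in full; the proofs are below) =====
def Claim_equal_removableRolls : Prop := ∀ (grid : List (List String)), Dom_removableRolls grid → Pre_removableRolls grid → Spec_removableRolls grid (removableRolls grid)

-- ===== LEMMAS AND PROOFS =====

-- Bool forms of A's tests
def pvQ (grid : List (List String)) (i j : Int) : Bool :=
  decide (pvAt grid i j = "@") && decide (pvNearby grid i j < 4)

def pvPA (grid : List (List String)) (i j : Int) (d : Int × Int) : Bool :=
  decide (0 ≤ i + d.1 ∧ i + d.1 < PySem.List.len grid ∧
    0 ≤ j + d.2 ∧ j + d.2 < PySem.List.len (PySem.List.pyGetD grid 0 []) ∧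
    pvAt grid (i + d.1) (j + d.2) = "@")

-- the list both programs end up collecting, in closed form
def pvSel (grid : List (List String)) : List (Int × Int) :=
  (PySem.List.pyRange 0 (PySem.List.len grid)).flatMap (fun i =>
    ((PySem.List.pyRange 0 (PySem.List.len (PySem.List.pyGetD grid 0 []))).filter
      (pvQ grid i)).map
      (fun j => (i, j)))

lemma pvWidthB_eq (grid : List (List String)) :
    pvWidthB grid = PySem.List.len (PySem.List.pyGetD grid 0 []) := by
  cases grid <;> simp [pvWidthB, PySem.List.pyGetD, PySem.List.len, PySem.List.pyIdx?, PySem.List.pyGet?]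

lemma pvNearby_countP (grid : List (List String)) (i j : Int) :
    pvNearby grid i j = ((pvDirsA.countP (pvPA grid i j) : Nat) : Int) := by
  have hbody : (fun (n : Int) (d : Int × Int) =>
      if 0 ≤ i + d.1 ∧ i + d.1 < PySem.List.len grid ∧
         0 ≤ j + d.2 ∧ j + d.2 < PySem.List.len (PySem.List.pyGetD grid 0 []) then
        (if pvAt grid (i + d.1) (j + d.2) = "@" then n + 1 else n)
      else n) =
      (fun (n : Int) (d : Int × Int) => if (pvPA grid i j d) = true then n + 1 else n) := by
    funext n d
    by_cases hb : 0 ≤ i + d.1 ∧ i + d.1 < PySem.List.len grid ∧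
         0 ≤ j + d.2 ∧ j + d.2 < PySem.List.len (PySem.List.pyGetD grid 0 []) <;>
      by_cases ha : pvAt grid (i + d.1) (j + d.2) = "@" <;>
      simp [pvPA, hb, ha]
  unfold pvNearby
  rw [hbody, PySem.List.foldl_count_if, zero_add]

-- the pair-state loop shapes of A
lemma pvPairFold {β : Type} (q : β → Bool) (f : β → Int × Int) (l : List β)
    (st : Int × List (Int × Int)) :
    l.foldl (fun st x => if q x = true then (st.1 + 1, st.2 ++ [f x]) else st) st =
    (st.1 + ((l.countP q : Nat) : Int), st.2 ++ (l.filter q).map f) := by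
  induction l generalizing st with
  | nil => simp
  | cons a t ih =>
    by_cases h : q a = true
    · rw [List.foldl_cons, if_pos h, ih]
      refine Prod.ext ?_ ?_ <;> simp [h]
      omega
    · rw [List.foldl_cons, if_neg h, ih]
      refine Prod.ext ?_ ?_ <;> simp [h]

lemma pvPairFold2 {β : Type} (c : β → Int) (L : β → List (Int × Int)) (l : List β)
    (st : Int × List (Int × Int)) :
    l.foldl (fun st x => (st.1 + c x, st.2 ++ L x)) st =
    (st.1 + (l.map c).sum, st.2 ++ l.flatMap L) := by
  induction l generalizing st with
  | nil => simp
  | cons a t ih =>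
    rw [List.foldl_cons, ih]
    refine Prod.ext ?_ ?_ <;> simp [add_assoc]

lemma pvInner_eq (grid : List (List String)) (i : Int) (st : Int × List (Int × Int)) :
    (PySem.List.pyRange 0 (PySem.List.len (PySem.List.pyGetD grid 0 []))).foldl (fun st j =>
      if pvAt grid i j = "@" then
        (if pvNearby grid i j < 4 then (st.1 + 1, st.2 ++ [(i, j)]) else st)
      else st) st =
    (st.1 + (((PySem.List.pyRange 0 (PySem.List.len (PySem.List.pyGetD grid 0 []))).countP
        (pvQ grid i) : Nat) : Int),
     st.2 ++ ((PySem.List.pyRange 0 (PySem.List.len (PySem.List.pyGetD grid 0 []))).filter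
        (pvQ grid i)).map (fun j => (i, j))) := by
  rw [PySem.List.foldl_congr_mem _ _
    (fun st j => if pvQ grid i j = true then (st.1 + 1, st.2 ++ [(i, j)]) else st) st
    (by
      intro acc x _
      by_cases h1 : pvAt grid i x = "@" <;>
        by_cases h2 : pvNearby grid i x < 4 <;>
        simp [pvQ, h1, h2])]
  exact pvPairFold (pvQ grid i) (fun j => (i, j)) _ st

lemma pvA_eq (grid : List (List String)) :
    removableRolls grid = (((pvSel grid).length : Int), pvSel grid) := by
  unfold removableRolls
  rw [PySem.List.foldl_congr_mem _ _
    (fun st i => (st.1 + (((PySem.List.pyRange 0 (PySem.List.len (PySem.List.pyGetD grid 0 []))).countP (pvQ grid i) : Nat) : Int),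
                  st.2 ++ ((PySem.List.pyRange 0 (PySem.List.len (PySem.List.pyGetD grid 0 []))).filter (pvQ grid i)).map (fun j => (i, j))))
    ((0 : Int), ([] : List (Int × Int)))
    (fun acc x _ => pvInner_eq grid x acc)]
  rw [pvPairFold2, zero_add, List.nil_append]
  unfold pvSel
  refine Prod.ext ?_ rfl
  dsimp only
  rw [List.length_flatMap, Nat.cast_list_sum, List.map_map]
  refine congrArg List.sum (List.map_congr_left ?_)
  intro x _
  simp [Function.comp, List.countP_eq_length_filter]

-- ---------- B side: the scatter dict counts exactly A's `nearby` ----------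

-- the flat stream of keys the scatter pass increments, in scatter order
def pvScatKeys (grid : List (List String)) : List (Int × Int) :=
  (PySem.List.pyRange 0 (PySem.List.len grid)).flatMap (fun x =>
    (PySem.List.pyRange 0 (pvWidthB grid)).flatMap (fun y =>
      if pvCellB grid x y = "@" then
        pvOffsB.filterMap (fun p =>
          if 0 ≤ x + p.1 ∧ x + p.1 < PySem.List.len grid ∧
             0 ≤ y + p.2 ∧ y + p.2 < pvWidthB grid then
            some (x + p.1, y + p.2)
          else none)
      else []))

lemma pvGenFilterFold {α κ ρ : Type} (l : List α) (c : α → Prop) [DecidablePred c]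
    (k : α → κ) (g : ρ → κ → ρ) (d : ρ) :
    l.foldl (fun d x => if c x then g d (k x) else d) d =
    (l.filterMap (fun x => if c x then some (k x) else none)).foldl g d := by
  induction l generalizing d with
  | nil => rfl
  | cons a t ih =>
    by_cases h : c a <;> simp [h, ih]

lemma pvScatter_eq (grid : List (List String)) :
    pvScatter grid =
      (pvScatKeys grid).foldl (fun d k => d.insert k (d.getD k 0 + 1)) PySem.Dict.empty := by
  unfold pvScatter pvScatKeys
  rw [List.foldl_flatMap]
  refine List.foldl_ext _ _ _ (fun d x _ => ?_)
  rw [List.foldl_flatMap]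
  refine List.foldl_ext _ _ _ (fun d y _ => ?_)
  by_cases h : pvCellB grid x y = "@"
  · rw [if_pos h, if_pos h,
      pvGenFilterFold pvOffsB
        (fun p => 0 ≤ x + p.1 ∧ x + p.1 < PySem.List.len grid ∧
          0 ≤ y + p.2 ∧ y + p.2 < pvWidthB grid)
        (fun p => (x + p.1, y + p.2))
        (fun d k => d.insert k (d.getD k 0 + 1)) d]
  · rw [if_neg h, if_neg h]
    rfl

lemma pvGetD_scatter (grid : List (List String)) (v : Int × Int) :
    (pvScatter grid).getD v 0 = (((pvScatKeys grid).count v : Nat) : Int) := by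
  rw [pvScatter_eq, PySem.Dict.getD_foldl_insert_add_one]
  simp

lemma pvCountFlatMap {α β : Type} [BEq β] (l : List α) (K : α → List β) (v : β) :
    (l.flatMap K).count v = (l.map (fun x => (K x).count v)).sum := by
  induction l with
  | nil => rfl
  | cons a t ih => simp [List.count_append, ih]

lemma pvSumIndicator (l : List Int) (hl : l.Nodup) (v : Int) :
    (l.map (fun y => if y = v then 1 else 0)).sum = if v ∈ l then 1 else 0 := by
  induction l with
  | nil => simp
  | cons a t ih =>
    rcases List.nodup_cons.mp hl with ⟨ha, ht⟩
    by_cases h : a = v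
    · subst h
      simp [ih ht, ha]
    · simp [h, ih ht, Ne.symm h]

lemma pvSwap {β : Type} (l : List Int) (hl : l.Nodup) (offs : List β)
    (q : β → Bool) (c : β → Int) :
    (l.map (fun y => offs.countP (fun p => q p && decide (y = c p)))).sum =
    offs.countP (fun p => q p && decide (c p ∈ l)) := by
  induction offs with
  | nil => simp
  | cons a t ih =>
    simp only [List.countP_cons]
    have : (l.map (fun y => t.countP (fun p => q p && decide (y = c p)) +
        (if q a && decide (y = c a) then 1 else 0))).sum =
        (l.map (fun y => t.countP (fun p => q p && decide (y = c p)))).sum +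
        (l.map (fun y => if q a && decide (y = c a) then 1 else 0)).sum := by
      rw [← List.sum_map_add]
    rw [this, ih]
    congr 1
    by_cases hq : q a = true
    · simp only [hq, Bool.true_and]
      have := pvSumIndicator l hl (c a)
      simpa using this
    · simp [hq]

-- the key counting fact: for an in-bounds target, the scatter stream hits (i, j)
-- exactly `nearby(i, j)` times
lemma pvCount_scat (grid : List (List String)) (i j : Int)
    (hi : 0 ≤ i ∧ i < PySem.List.len grid)
    (hj : 0 ≤ j ∧ j < pvWidthB grid) :
    ((pvScatKeys grid).count (i, j) : Int) = pvNearby grid i j := by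
  rw [pvWidthB_eq] at hj
  have hNat : (pvScatKeys grid).count (i, j) = pvDirsA.countP (pvPA grid i j) := by
    unfold pvScatKeys
    rw [pvWidthB_eq]
    rw [pvCountFlatMap]
    simp only [pvCountFlatMap, apply_ite (List.count ((i, j) : Int × Int)),
      List.count_nil, List.count_filterMap]
    -- the option-equality test is just "this offset of (x, y) hits the target (i, j)"
    have hP : ∀ (x y : Int) (p : Int × Int),
        ((if 0 ≤ x + p.1 ∧ x + p.1 < PySem.List.len grid ∧
             0 ≤ y + p.2 ∧ y + p.2 < PySem.List.len (PySem.List.pyGetD grid 0 [])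
           then some (x + p.1, y + p.2) else none) == some ((i, j) : Int × Int))
        = (decide (x + p.1 = i) && decide (y + p.2 = j)) := by
      intro x y p
      by_cases h1 : x + p.1 = i
      · by_cases h2 : y + p.2 = j
        · rw [if_pos ⟨by omega, by omega, by omega, by omega⟩]
          simp [h1, h2]
        · split <;> simp [Prod.ext_iff, h2]
      · split <;> simp [Prod.ext_iff, h1]
    simp only [hP]
    -- fold the '@' gate into the countP predicate
    have hGate : ∀ (x y : Int),
        (if pvCellB grid x y = "@" then
          pvOffsB.countP (fun p => decide (x + p.1 = i) && decide (y + p.2 = j)) else 0)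
        = pvOffsB.countP (fun p => decide (pvCellB grid x y = "@") &&
            (decide (x + p.1 = i) && decide (y + p.2 = j))) := by
      intro x y
      by_cases hc : pvCellB grid x y = "@" <;> simp [hc]
    simp only [hGate]
    -- solve the y-equation: the only y that can hit column j via offset p is j - p.2
    have hY : ∀ (x y : Int) (p : Int × Int),
        (decide (pvCellB grid x y = "@") && (decide (x + p.1 = i) && decide (y + p.2 = j)))
        = (decide (pvCellB grid x (j - p.2) = "@" ∧ x + p.1 = i) && decide (y = j - p.2)) := by
      intro x y p
      by_cases hy : y = j - p.2
      · subst hy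
        have h2 : j - p.2 + p.2 = j := by ring
        simp [h2, Bool.decide_and]
      · have h2 : ¬(y + p.2 = j) := by omega
        simp [hy, h2]
    simp only [hY]
    have hx1 : ∀ x : Int,
        ((PySem.List.pyRange 0 (PySem.List.len (PySem.List.pyGetD grid 0 []))).map
          (fun y => pvOffsB.countP (fun p =>
            decide (pvCellB grid x (j - p.2) = "@" ∧ x + p.1 = i) && decide (y = j - p.2)))).sum
        = pvOffsB.countP (fun p =>
            decide (pvCellB grid x (j - p.2) = "@" ∧ x + p.1 = i) &&
            decide ((j - p.2) ∈ PySem.List.pyRange 0 (PySem.List.len (PySem.List.pyGetD grid 0 [])))) :=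
      fun x => pvSwap _ (PySem.List.nodup_pyRange_one _ _) pvOffsB _ _
    simp only [hx1, PySem.List.mem_pyRange_one]
    -- solve the x-equation likewise: the only x that can hit row i via offset p is i - p.1
    have hX : ∀ (x : Int) (p : Int × Int),
        (decide (pvCellB grid x (j - p.2) = "@" ∧ x + p.1 = i) &&
          decide (0 ≤ j - p.2 ∧ j - p.2 < PySem.List.len (PySem.List.pyGetD grid 0 [])))
        = (decide (pvCellB grid (i - p.1) (j - p.2) = "@" ∧
            0 ≤ j - p.2 ∧ j - p.2 < PySem.List.len (PySem.List.pyGetD grid 0 [])) &&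
           decide (x = i - p.1)) := by
      intro x p
      by_cases hx : x = i - p.1
      · subst hx
        have h1 : i - p.1 + p.1 = i := by ring
        simp [h1, Bool.decide_and, Bool.and_comm]
      · have h1 : ¬(x + p.1 = i) := by omega
        simp [hx, h1, Bool.decide_and]
    simp only [hX]
    rw [pvSwap _ (PySem.List.nodup_pyRange_one _ _) pvOffsB _ _]
    simp only [PySem.List.mem_pyRange_one]
    -- finally: B's offsets are the negations of A's direction list
    have hperm : (pvOffsB.map (fun p : Int × Int => (-p.1, -p.2))).Perm pvDirsA := by decide
    rw [← hperm.countP_eq (pvPA grid i j), List.countP_map]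
    refine List.countP_congr (fun p _ => ?_)
    simp only [pvPA, pvCellB, pvAt, Function.comp]
    have e1 : i + -p.1 = i - p.1 := by ring
    have e2 : j + -p.2 = j - p.2 := by ring
    rw [← Bool.decide_and]
    simp only [e1, e2]
    simp only [decide_eq_true_eq]
    tauto
  rw [pvNearby_countP]
  exact_mod_cast hNat

-- B's getD test agrees with A's nearby on in-bounds cells
lemma pvGetD_nearby (grid : List (List String)) (i j : Int)
    (hi : 0 ≤ i ∧ i < PySem.List.len grid)
    (hj : 0 ≤ j ∧ j < pvWidthB grid) :
    (pvScatter grid).getD (i, j) 0 = pvNearby grid i j := by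
  rw [pvGetD_scatter, pvCount_scat grid i j hi hj]

lemma pvB_eq (grid : List (List String)) :
    removableRolls_alt grid = (((pvSel grid).length : Int), pvSel grid) := by
  have hrem : (PySem.List.pyRange 0 (PySem.List.len grid)).foldl (fun acc i =>
      (PySem.List.pyRange 0 (pvWidthB grid)).foldl (fun acc j =>
        if pvCellB grid i j = "@" ∧ (pvScatter grid).getD (i, j) 0 < 4 then
          acc ++ [(i, j)] else acc) acc) [] = pvSel grid := by
    rw [PySem.List.foldl_congr_mem _ _
      (fun acc i => acc ++ ((PySem.List.pyRange 0 (PySem.List.len (PySem.List.pyGetD grid 0 []))).filter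
        (pvQ grid i)).map (fun j => (i, j)))
      ([] : List (Int × Int))
      (by
        intro acc x hx
        have hxb : 0 ≤ x ∧ x < PySem.List.len grid := (PySem.List.mem_pyRange_one).mp hx
        rw [PySem.List.foldl_congr_mem _ _
          (fun acc j => if pvQ grid x j = true then acc ++ [(x, j)] else acc) acc
          (by
            intro acc2 y hy
            have hyb : 0 ≤ y ∧ y < pvWidthB grid := (PySem.List.mem_pyRange_one).mp hy
            have hg := pvGetD_nearby grid x y hxb hyb
            have hcell : pvCellB grid x y = pvAt grid x y := rfl
            by_cases h1 : pvAt grid x y = "@" <;>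
              by_cases h2 : pvNearby grid x y < 4 <;>
              simp [pvQ, hcell, h1, h2, hg])]
        rw [PySem.List.foldl_append_if, pvWidthB_eq])]
    rw [PySem.List.foldl_append_eq_flatMap, List.nil_append]
    rfl
  simp only [removableRolls_alt]
  rw [hrem]
  simp [PySem.List.len]

-- ===== VERDICT (by name: the statement is the Claim_ definition above) =====
theorem removableRolls_spec : Claim_equal_removableRolls := by
  intro grid _ _
  unfold Spec_removableRolls
  rw [pvA_eq, pvB_eq]
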